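-- pv_equiv track=rewrite | github.com/The-Educational-Equality-Institute/myeloid-variant-pipeline | mutation_profile/scripts/setbp1_cooccurrence.py | get_panel_adjusted_samples
-- ===== SOURCE A (Python) =====
-- def get_panel_adjusted_samples(
--     gene_a: str,
--     gene_b: str,
--     sample_panel: dict,
--     panel_genes: dict,
-- ) -> set:
--     """Return set of sample IDs where BOTH gene_a and gene_b are on the panel."""
--     valid = set()
--     for sample_id, panel_id in sample_panel.items():
--         genes_on_panel = panel_genes.get(panel_id, set())
--         if gene_a in genes_on_panel and gene_b in genes_on_panel:
--             valid.add(sample_id)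
--     return valid
-- ===== SOURCE B (Python) =====
-- def get_panel_adjusted_samples(
--     gene_a: str,
--     gene_b: str,
--     sample_panel: dict,
--     panel_genes: dict,
-- ) -> set:
--     """Return set of sample IDs where BOTH gene_a and gene_b are on the panel."""
--     valid_panels = {
--         panel_id
--         for panel_id, genes in panel_genes.items()
--         if gene_a in genes and gene_b in genes
--     }
--     return {
--         sample_id
--         for sample_id, panel_id in sample_panel.items()
--         if panel_id in valid_panels
--     }
-- ===== Notes on version B (the rewrite author's own statement) =====
-- stated objective: alternative
-- what changed: B first builds the set of panels containing both genes, then selects samples by membership in that precomputed index, instead of re-looking-up and re-checking genes inside the per-sample loop.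
import Mathlib
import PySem

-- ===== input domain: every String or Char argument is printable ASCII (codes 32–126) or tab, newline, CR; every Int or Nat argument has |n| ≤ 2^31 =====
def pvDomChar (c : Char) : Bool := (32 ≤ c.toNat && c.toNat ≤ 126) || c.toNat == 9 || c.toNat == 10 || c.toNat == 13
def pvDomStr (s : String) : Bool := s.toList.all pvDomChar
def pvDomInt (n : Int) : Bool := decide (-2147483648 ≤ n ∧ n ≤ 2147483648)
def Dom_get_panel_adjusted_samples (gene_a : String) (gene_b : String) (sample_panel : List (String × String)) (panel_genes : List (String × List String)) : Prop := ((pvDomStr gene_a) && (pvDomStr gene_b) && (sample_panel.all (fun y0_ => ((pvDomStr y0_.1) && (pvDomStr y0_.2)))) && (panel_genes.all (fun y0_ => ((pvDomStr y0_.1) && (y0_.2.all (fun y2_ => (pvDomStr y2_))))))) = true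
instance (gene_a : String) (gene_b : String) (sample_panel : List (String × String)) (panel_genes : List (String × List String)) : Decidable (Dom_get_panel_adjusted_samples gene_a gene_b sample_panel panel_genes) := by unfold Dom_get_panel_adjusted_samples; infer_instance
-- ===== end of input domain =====

-- B replaces A's per-sample gene recheck by an index-first decomposition: it first builds the
-- set of panels carrying both genes, then selects samples by membership in that index (alternative decomposition).

-- ===== PORT A =====
-- A: one loop over sample_panel; per sample, dict .get the panel's genes (default empty set) and test both genes.
def get_panel_adjusted_samples (gene_a : String) (gene_b : String) (sample_panel : List (String × String)) (panel_genes : List (String × List String)) : List String :=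
  sample_panel.foldl
    (fun valid item =>
      let genes_on_panel := (List.lookup item.2 panel_genes).getD []
      if genes_on_panel.contains gene_a && genes_on_panel.contains gene_b then
        PySem.Set.add valid item.1
      else valid)
    []

-- ===== PORT B =====
-- B: first pass builds the set of panel ids carrying both genes; second pass selects samples by membership.
def get_panel_adjusted_samples_alt (gene_a : String) (gene_b : String) (sample_panel : List (String × String)) (panel_genes : List (String × List String)) : List String :=
  let valid_panels : PySem.Set String :=
    panel_genes.foldl
      (fun s item =>
        if item.2.contains gene_a && item.2.contains gene_b then PySem.Set.add s item.1 else s)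
      []
  sample_panel.foldl
    (fun s item => if valid_panels.contains item.2 then PySem.Set.add s item.1 else s)
    []

-- ===== PRECONDITION & SPEC =====
-- Pre_ requires the panel_genes association list to have distinct keys; a Python dict always
-- has distinct keys, so this excludes no input the Python function can receive.
def Pre_get_panel_adjusted_samples (gene_a : String) (gene_b : String) (sample_panel : List (String × String)) (panel_genes : List (String × List String)) : Prop :=
  (panel_genes.map Prod.fst).Nodup

instance (gene_a : String) (gene_b : String) (sample_panel : List (String × String)) (panel_genes : List (String × List String)) : Decidable (Pre_get_panel_adjusted_samples gene_a gene_b sample_panel panel_genes) := by unfold Pre_get_panel_adjusted_samples; infer_instance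

def pvWitness_get_panel_adjusted_samples : String × String × (List (String × String)) × (List (String × List String)) :=
  ("SETBP1", "ASXL1", [("s1", "p1"), ("s2", "p2")], [("p1", ["SETBP1", "ASXL1"]), ("p2", ["SETBP1"])])

def Spec_get_panel_adjusted_samples (gene_a : String) (gene_b : String) (sample_panel : List (String × String)) (panel_genes : List (String × List String)) (out : List String) : Prop := out = get_panel_adjusted_samples_alt gene_a gene_b sample_panel panel_genes
instance (gene_a : String) (gene_b : String) (sample_panel : List (String × String)) (panel_genes : List (String × List String)) (out : List String) : Decidable (Spec_get_panel_adjusted_samples gene_a gene_b sample_panel panel_genes out) := by unfold Spec_get_panel_adjusted_samples; infer_instance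

-- ===== CLAIM (what is proved, stated in full; the proofs are below) =====
def Claim_equal_get_panel_adjusted_samples : Prop := ∀ (gene_a : String) (gene_b : String) (sample_panel : List (String × String)) (panel_genes : List (String × List String)), Dom_get_panel_adjusted_samples gene_a gene_b sample_panel panel_genes → Pre_get_panel_adjusted_samples gene_a gene_b sample_panel panel_genes → Spec_get_panel_adjusted_samples gene_a gene_b sample_panel panel_genes (get_panel_adjusted_samples gene_a gene_b sample_panel panel_genes)

-- ===== LEMMAS AND PROOFS =====

-- Membership in a fold that conditionally adds a projection of each element to a PySem.Set.
theorem mem_foldl_add_if {α β : Type} [BEq α] [LawfulBEq α] (f : β → α) (c : β → Bool)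
    (l : List β) (s : PySem.Set α) (x : α) :
    x ∈ l.foldl (fun s b => if c b then PySem.Set.add s (f b) else s) s
      ↔ x ∈ s ∨ ∃ b ∈ l, c b = true ∧ x = f b := by
  induction l generalizing s with
  | nil => simp
  | cons hd tl ih =>
    simp only [List.foldl_cons, ih, List.mem_cons]
    split_ifs with hc <;> simp [PySem.Set.mem_add, hc] <;> tauto

-- With distinct keys, first-match lookup characterises membership of a pair in the list.
theorem lookup_eq_some_iff_mem {ν : Type} (pg : List (String × ν))
    (hnd : (pg.map Prod.fst).Nodup) (k : String) (v : ν) :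
    List.lookup k pg = some v ↔ (k, v) ∈ pg := by
  induction pg with
  | nil => simp
  | cons hd tl ih =>
    obtain ⟨k1, v1⟩ := hd
    simp only [List.map_cons, List.nodup_cons] at hnd
    obtain ⟨hk, htl⟩ := hnd
    by_cases hkey : k = k1
    · subst hkey
      simp only [List.lookup, beq_self_eq_true, List.mem_cons, Option.some.injEq]
      constructor
      · rintro rfl; exact Or.inl rfl
      · rintro (h | h)
        · exact (Prod.mk.injEq .. ▸ h).2.symm ▸ rfl
        · exact absurd (List.mem_map.mpr ⟨(k, v), h, rfl⟩) hk
    · simp only [List.lookup, beq_eq_false_iff_ne.mpr hkey, List.mem_cons, ih htl]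
      constructor
      · exact Or.inr
      · rintro (h | h)
        · exact absurd (congrArg Prod.fst h) hkey
        · exact h

-- Membership in B's first-pass index: with distinct panel keys, a panel id is in valid_panels
-- exactly when its first-match gene list carries both genes.
theorem mem_valid_panels (ga gb : String) (pg : List (String × List String))
    (hnd : (pg.map Prod.fst).Nodup) (pid : String) :
    PySem.Set.contains (pg.foldl (fun s item => if item.2.contains ga && item.2.contains gb then PySem.Set.add s item.1 else s) ([] : PySem.Set String)) pid
      = (((List.lookup pid pg).getD []).contains ga && ((List.lookup pid pg).getD []).contains gb) := by
  rw [Bool.eq_iff_iff, PySem.Set.contains_iff]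
  rw [mem_foldl_add_if (fun item : String × List String => item.1)
      (fun item => item.2.contains ga && item.2.contains gb) pg [] pid]
  simp only [List.not_mem_nil, false_or]
  constructor
  · rintro ⟨b, hb, hcb, rfl⟩
    rw [(lookup_eq_some_iff_mem pg hnd b.1 b.2).mpr (by simpa using hb)]
    simpa using hcb
  · intro hc
    rcases hlk : List.lookup pid pg with _ | genes
    · rw [hlk] at hc; simp at hc
    · rw [hlk] at hc
      exact ⟨(pid, genes), (lookup_eq_some_iff_mem pg hnd pid genes).mp hlk, by simpa using hc, rfl⟩

theorem get_panel_adjusted_samples_spec : Claim_equal_get_panel_adjusted_samples := by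
  intro ga gb sp pg _ hpre
  unfold Spec_get_panel_adjusted_samples get_panel_adjusted_samples get_panel_adjusted_samples_alt
  simp only []
  congr 1
  funext s item
  rw [mem_valid_panels ga gb pg hpre item.2]
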